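-- pv_equiv track=rewrite | github.com/miliar/Code_Jam_Webscraper | solutions_python/Problem_178/2853.py | solve
-- ===== SOURCE A (Python) =====
-- BLANK_SIDE = '-'
--
-- def solve(stack):
--     flips = 0
--     state = stack[0]
--     if state == BLANK_SIDE:
--         flips += 1
--     for pancake in stack:
--         if pancake == state:
--             continue
--         if pancake == BLANK_SIDE:
--                 flips += 2
--         state = pancake
--     return flips
-- ===== SOURCE B (Python) =====
-- BLANK_SIDE = '-'
--
-- def dash_runs(xs):
--     """Number of maximal runs of BLANK_SIDE, by peeling one maximal run at a time."""
--     k = 0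
--     i = 0
--     n = len(xs)
--     while i < n:
--         head = xs[i]
--         j = i
--         while j < n and xs[j] == head:
--             j += 1
--         if head == BLANK_SIDE:
--             k += 1
--         i = j
--     return k
--
-- def solve(stack):
--     return 2 * dash_runs(stack) - (1 if stack[0] == BLANK_SIDE else 0)
-- ===== Notes on version B (the rewrite author's own statement) =====
-- stated objective: alternative
-- what changed: Replaces A's single element-by-element pass with a running state and flip accumulator by a hand-rolled groupby: an outer loop peels one maximal run at a time (inner loop skips the run), counts the blank runs k, and returns the closed formula 2*k - (1 if the first pancake is blank).
import Mathlib
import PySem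

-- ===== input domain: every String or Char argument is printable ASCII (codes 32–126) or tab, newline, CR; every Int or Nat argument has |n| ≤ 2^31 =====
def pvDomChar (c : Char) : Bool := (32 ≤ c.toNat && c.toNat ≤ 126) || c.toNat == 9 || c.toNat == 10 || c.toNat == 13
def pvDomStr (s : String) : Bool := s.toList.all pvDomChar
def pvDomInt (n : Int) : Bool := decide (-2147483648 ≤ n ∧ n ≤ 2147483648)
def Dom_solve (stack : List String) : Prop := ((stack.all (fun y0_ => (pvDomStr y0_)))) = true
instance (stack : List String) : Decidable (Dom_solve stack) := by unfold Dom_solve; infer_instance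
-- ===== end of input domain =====

-- B replaces A's element-by-element state machine by a hand-rolled groupby that peels
-- one maximal run at a time, counts blank runs k, and returns 2*k - (1 if first blank).

-- ===== PORT A =====
def solve (stack : List String) : Int :=
  match stack with
  | [] => 0  -- unreachable: Pre_solve excludes [] (Python raises IndexError on stack[0])
  | s0 :: _ =>
    let flips : Int := if s0 = "-" then 1 else 0
    (stack.foldl (fun (acc : Int × String) pancake =>
        if pancake = acc.2 then acc
        else (if pancake = "-" then acc.1 + 2 else acc.1, pancake))
      (flips, s0)).1

-- ===== PORT B =====
-- outer while loop of dash_runs: peel the maximal leading run (inner skip loop =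
-- dropWhile on the tail), count it if blank, continue on the rest
def dashRuns : List String → Int
  | [] => 0
  | x :: xs =>
    (if x = "-" then 1 else 0) + dashRuns (xs.dropWhile (· == x))
termination_by xs => xs.length
decreasing_by
  simpa using Nat.lt_succ_of_le (List.length_dropWhile_le (· == x) xs)

def solve_alt (stack : List String) : Int :=
  match stack with
  | [] => 0  -- unreachable: Pre_solve excludes [] (Python raises IndexError on stack[0])
  | first :: _ =>
    2 * dashRuns stack - (if first = "-" then 1 else 0)

-- ===== PRECONDITION & SPEC =====
-- Pre_: both Pythons raise IndexError on the empty list (stack[0]).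
def Pre_solve (stack : List String) : Prop := stack ≠ []
instance (stack : List String) : Decidable (Pre_solve stack) := by unfold Pre_solve; infer_instance
def pvWitness_solve : List String := ["-", "+", "-"]
def Spec_solve (stack : List String) (out : Int) : Prop := out = solve_alt stack
instance (stack : List String) (out : Int) : Decidable (Spec_solve stack out) := by unfold Spec_solve; infer_instance

-- ===== CLAIM =====
def Claim_equal_solve : Prop := ∀ (stack : List String), Dom_solve stack → Pre_solve stack → Spec_solve stack (solve stack)

-- ===== LEMMAS AND PROOFS =====

-- number of positions in t where the element is "-" and differs from its predecessor
-- (p = the predecessor of t's head); characterises A's fold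
def cntRuns (p : String) (t : List String) : Int :=
  match t with
  | [] => 0
  | c :: t => (if c = "-" ∧ c ≠ p then 1 else 0) + cntRuns c t

-- A's fold, started after its head has been consumed, adds 2 per counted run start
theorem foldA_eq (t : List String) : ∀ (p : String) (f : Int),
    (t.foldl (fun (acc : Int × String) pancake =>
        if pancake = acc.2 then acc
        else (if pancake = "-" then acc.1 + 2 else acc.1, pancake))
      (f, p)).1 = f + 2 * cntRuns p t := by
  induction t with
  | nil => intro p f; simp [cntRuns]
  | cons c t ih =>
    intro p f
    simp only [List.foldl_cons, cntRuns]
    by_cases hcp : c = p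
    · subst hcp; simp [ih]
    · simp only [if_neg hcp]
      by_cases hb : c = "-"
      · subst hb; simp [hcp, ih]; ring
      · simp [hb, ih]

-- peeling a run agrees with the predecessor-based run-start count
theorem dashRuns_dropWhile (t : List String) : ∀ (p : String),
    dashRuns (t.dropWhile (· == p)) = cntRuns p t := by
  induction t with
  | nil => intro p; simp [dashRuns, cntRuns]
  | cons c t ih =>
    intro p
    by_cases hcp : c = p
    · subst hcp
      simp only [List.dropWhile_cons, beq_self_eq_true, if_pos, cntRuns]
      simpa using ih c
    · rw [List.dropWhile_cons_of_neg (by simpa using hcp), dashRuns]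
      simp only [cntRuns, ih c]
      congr 1
      by_cases hb : c = "-"
      · subst hb; simp [hcp]
      · simp [hb]

theorem dashRuns_cons (s0 : String) (t : List String) :
    dashRuns (s0 :: t) = (if s0 = "-" then 1 else 0) + cntRuns s0 t := by
  rw [dashRuns, dashRuns_dropWhile]

-- ===== VERDICT =====
theorem solve_spec : Claim_equal_solve := by
  intro stack _ hpre
  unfold Spec_solve solve solve_alt
  match stack with
  | [] => exact absurd rfl hpre
  | s0 :: t =>
    simp only [List.foldl_cons, dashRuns_cons]
    rw [if_pos True.intro, foldA_eq]
    by_cases h0 : s0 = "-"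
    · simp [h0]; ring
    · simp [h0]
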